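-- pv_equiv track=rewrite | github.com/flxequal/AdventOfCode | 21/main2.py | calc_paths_from_options
-- ===== SOURCE A (Python) =====
-- def calc_paths_from_options(options):
--
--     paths = [""]
--     for opt in options:
--         tmp_paths = []
--         for o in list(opt):
--             for p in paths:
--                 tmp_paths.append(p + o + "A")
--         paths = tmp_paths
--
--     return paths
-- ===== SOURCE B (Python) =====
-- def calc_paths_from_options(options):
--     opts = [list(opt) for opt in options]
--     total = 1
--     for opt in opts:
--         total *= len(opt)
--     paths = []
--     for i in range(total):
--         place = 1
--         chars = []
--         for opt in opts:
--             d = (i // place) % len(opt)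
--             chars.append(opt[d] + "A")
--             place *= len(opt)
--         paths.append("".join(chars))
--     return paths
-- ===== Notes on version B (the rewrite author's own statement) =====
-- stated objective: alternative
-- what changed: Replaces the generation-by-generation rebuilding of partial path lists with direct mixed-radix enumeration: each output index is decoded into one digit per option (first option least significant) and its string emitted independently.
import Mathlib
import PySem

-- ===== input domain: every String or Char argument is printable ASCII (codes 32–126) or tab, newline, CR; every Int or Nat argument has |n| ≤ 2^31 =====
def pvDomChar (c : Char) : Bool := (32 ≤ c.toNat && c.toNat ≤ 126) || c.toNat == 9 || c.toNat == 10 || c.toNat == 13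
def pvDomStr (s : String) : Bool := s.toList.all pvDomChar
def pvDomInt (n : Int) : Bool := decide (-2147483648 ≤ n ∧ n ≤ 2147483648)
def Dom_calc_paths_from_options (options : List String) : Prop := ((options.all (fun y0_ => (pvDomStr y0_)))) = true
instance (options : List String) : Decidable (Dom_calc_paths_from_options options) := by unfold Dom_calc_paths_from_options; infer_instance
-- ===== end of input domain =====

-- B replaces A's level-by-level rebuilding of partial-path lists with direct mixed-radix
-- decoding of each output index (alternative decomposition; no speed claim).

-- ===== PORT A =====
def calc_paths_from_options (options : List String) : List String :=
  options.foldl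
    (fun paths opt =>
      opt.toList.foldl
        (fun tmp o =>
          paths.foldl (fun tmp p => tmp ++ [p ++ String.mk [o] ++ "A"]) tmp)
        [])
    [""]

-- ===== PORT B =====
-- opt[d] is ported as getD with an (unreachable) default: whenever some opt is empty,
-- total = 0 and List.range total = [], so the body never runs.
def calc_paths_from_options_alt (options : List String) : List String :=
  let opts := options.map String.toList
  let total := opts.foldl (fun a opt => a * opt.length) 1
  (List.range total).map (fun i =>
    let st := opts.foldl
      (fun (st : Nat × List String) opt =>
        let d := (i / st.1) % opt.length
        (st.1 * opt.length, st.2 ++ [String.mk [opt.getD d ' '] ++ "A"]))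
      (1, [])
    String.join st.2)

-- ===== PRECONDITION & SPEC =====
def Spec_calc_paths_from_options (options : List String) (out : List String) : Prop := out = calc_paths_from_options_alt options
instance (options : List String) (out : List String) : Decidable (Spec_calc_paths_from_options options out) := by unfold Spec_calc_paths_from_options; infer_instance

-- ===== CLAIM (what is proved, stated in full; the proofs are below) =====
def Claim_equal_calc_paths_from_options : Prop := ∀ (options : List String), Dom_calc_paths_from_options options → Spec_calc_paths_from_options options (calc_paths_from_options options)

-- ===== LEMMAS AND PROOFS =====

-- Mixed-radix spec: paths of options opts, first option varying fastest.
def pvS : List (List Char) → List String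
  | [] => [""]
  | opt :: xs => (pvS xs).flatMap (fun tail => opt.map (fun o => String.mk [o] ++ "A" ++ tail))

def pvProd : List (List Char) → Nat
  | [] => 1
  | opt :: xs => pvProd xs * opt.length

-- decode index i into the path string
def pvF : List (List Char) → Nat → String
  | [], _ => ""
  | opt :: xs, i => String.mk [opt.getD (i % opt.length) ' '] ++ "A" ++ pvF xs (i / opt.length)

-- the per-option pieces emitted by B's inner fold, starting at place p
def pvPieces : List (List Char) → Nat → Nat → List String
  | [], _, _ => []
  | opt :: xs, p, i =>
      (String.mk [opt.getD ((i / p) % opt.length) ' '] ++ "A") :: pvPieces xs (p * opt.length) i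

theorem fold_snoc (l : List String) (f : String → String) (acc : List String) :
    l.foldl (fun t p => t ++ [f p]) acc = acc ++ l.map f := by
  induction l generalizing acc with
  | nil => simp
  | cons a l ih => simp [ih]

theorem fold_flat (l : List Char) (g : Char → List String) (acc : List String) :
    l.foldl (fun t o => t ++ g o) acc = acc ++ l.flatMap g := by
  induction l generalizing acc with
  | nil => simp
  | cons a l ih => simp [ih]

theorem A_fold (opts : List String) (paths : List String) :
    opts.foldl
      (fun paths opt =>
        opt.toList.flatMap (fun o => paths.map (fun p => p ++ String.mk [o] ++ "A")))
      paths
    = (pvS (opts.map String.toList)).flatMap (fun suf => paths.map (· ++ suf)) := by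
  induction opts generalizing paths with
  | nil => simp [pvS]
  | cons opt rest ih =>
      simp only [List.foldl_cons, List.map_cons, pvS]
      rw [ih]
      rw [List.flatMap_assoc]
      congr 1; funext suf
      simp [List.map_flatMap, List.flatMap_map, List.map_map, Function.comp_def, String.append_assoc]

theorem A_eq_S (options : List String) :
    calc_paths_from_options options = pvS (options.map String.toList) := by
  unfold calc_paths_from_options
  simp only [fold_snoc, fold_flat, List.nil_append]
  rw [A_fold]
  simp

theorem prod_fold (opts : List (List Char)) (a : Nat) :
    opts.foldl (fun a opt => a * opt.length) a = a * pvProd opts := by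
  induction opts generalizing a with
  | nil => simp [pvProd]
  | cons o xs ih => simp [pvProd, ih]; ring

theorem map_getD (l : List Char) (h : Char → String) :
    l.map h = (List.range l.length).map (fun d => h (l.getD d ' ')) := by
  induction l with
  | nil => simp
  | cons a l ih =>
      simp [List.range_succ_eq_map, List.map_map, Function.comp, ih]

theorem range_mul_flat {α : Type} (T r : Nat) (f : Nat → α) :
    (List.range (T * r)).map f
      = (List.range T).flatMap (fun t => (List.range r).map (fun d => f (t * r + d))) := by
  induction T with
  | zero => simp
  | succ T ih =>
      rw [Nat.succ_mul, List.range_add, List.map_append, ih, List.range_succ,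
        List.flatMap_append]
      simp [List.map_map, Function.comp]

theorem S_eq_range (opts : List (List Char)) :
    pvS opts = (List.range (pvProd opts)).map (pvF opts) := by
  induction opts with
  | nil => simp [pvS, pvProd, pvF]
  | cons opt xs ih =>
      simp only [pvS, ih, pvProd]
      rw [range_mul_flat, List.flatMap_map]
      congr 1; funext t
      rw [map_getD]
      apply List.map_congr_left
      intro d hd
      simp only [List.mem_range] at hd
      have hr : 0 < opt.length := Nat.lt_of_le_of_lt (Nat.zero_le d) hd
      have h1 : (t * opt.length + d) % opt.length = d := by
        rw [Nat.add_comm, Nat.add_mul_mod_self_right, Nat.mod_eq_of_lt hd]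
      have h2 : (t * opt.length + d) / opt.length = t := by
        rw [Nat.add_comm, Nat.add_mul_div_right _ _ hr, Nat.div_eq_of_lt hd, Nat.zero_add]
      simp [pvF, h1, h2]

theorem join_cons (a : String) (l : List String) :
    String.join (a :: l) = a ++ String.join l := by
  have key : ∀ (l : List String) (s : String), l.foldl (· ++ ·) s = s ++ String.join l := by
    intro l
    induction l with
    | nil => intro s; simp [String.join]
    | cons b l ih =>
        intro s
        simp only [String.join, List.foldl_cons] at *
        rw [ih (s ++ b), ih ("" ++ b)]
        simp [String.append_assoc]
  simp only [String.join, List.foldl_cons]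
  rw [key]
  simp [String.join]

theorem fold_pieces (opts : List (List Char)) (i : Nat) (p : Nat) (acc : List String) :
    (opts.foldl
      (fun (st : Nat × List String) opt =>
        (st.1 * opt.length, st.2 ++ [String.mk [opt.getD ((i / st.1) % opt.length) ' '] ++ "A"]))
      (p, acc)).2
    = acc ++ pvPieces opts p i := by
  induction opts generalizing p acc with
  | nil => simp [pvPieces]
  | cons opt xs ih =>
      simp only [List.foldl_cons]
      rw [ih]
      simp [pvPieces]

theorem join_pieces (opts : List (List Char)) (i p : Nat) :
    String.join (pvPieces opts p i) = pvF opts (i / p) := by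
  induction opts generalizing p with
  | nil => simp [pvPieces, pvF, String.join]
  | cons opt xs ih =>
      simp only [pvPieces, pvF, join_cons, ih, Nat.div_div_eq_div_mul]

theorem B_eq_range (options : List String) :
    calc_paths_from_options_alt options
      = (List.range (pvProd (options.map String.toList))).map
          (pvF (options.map String.toList)) := by
  unfold calc_paths_from_options_alt
  simp only [prod_fold, Nat.one_mul]
  apply List.map_congr_left
  intro i _
  rw [fold_pieces]
  simp [join_pieces]

-- ===== VERDICT (by name: the statement is the Claim_ definition above) =====
theorem calc_paths_from_options_spec : Claim_equal_calc_paths_from_options := by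
  intro options _
  unfold Spec_calc_paths_from_options
  rw [A_eq_S, S_eq_range, B_eq_range]
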